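-- pv_equiv track=rewrite | github.com/zmrdltl/problemSolving | programmers/코딩 기초 트레이닝/빈 배열에 추가, 삭제하기.py | solution
-- ===== SOURCE A (Python) =====
-- def solution(arr, flag):
--     x = []
--     for i in range(0, len(flag)):
--         if flag[i]:
--             x.extend([arr[i]]*arr[i]*2)
--         else:
--             x = x[:-arr[i]]
--     return x
-- ===== SOURCE B (Python) =====
-- def solution(arr, flag):
--     # Run-length representation of x: blocks holds (value, count) blocks in
--     # order; total tracks the flat length.  Truncation pops / shrinks trailing
--     # blocks; the flat list is expanded once at the end.
--     blocks = []
--     total = 0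
--     for a, f in zip(arr, flag):
--         if f:
--             n = a * 2
--             if n > 0:
--                 blocks.append((a, n))
--                 total += n
--         else:
--             # new length = len(x[:-a]) by Python's slice-clamp rule
--             stop = -a
--             if stop < 0:
--                 target = total + stop
--                 if target < 0:
--                     target = 0
--             else:
--                 target = min(stop, total)
--             drop = total - target
--             while drop > 0 and blocks:
--                 v, c = blocks[-1]
--                 if c <= drop:
--                     blocks.pop()
--                     drop -= c
--                 else:
--                     blocks[-1] = (v, c - drop)
--                     drop = 0
--             total = target
--     out = []
--     for v, c in blocks:
--         out.extend([v] * c)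
--     return out
-- ===== Notes on version B (the rewrite author's own statement) =====
-- stated objective: faster
-- what changed: Replaces the literal list (rebuilt/copied by extend and slicing) with a run-length list of (value,count) blocks plus a tracked length: extends push one block, truncations pop/shrink whole blocks, and the flat list is expanded once at the end.
import Mathlib
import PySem

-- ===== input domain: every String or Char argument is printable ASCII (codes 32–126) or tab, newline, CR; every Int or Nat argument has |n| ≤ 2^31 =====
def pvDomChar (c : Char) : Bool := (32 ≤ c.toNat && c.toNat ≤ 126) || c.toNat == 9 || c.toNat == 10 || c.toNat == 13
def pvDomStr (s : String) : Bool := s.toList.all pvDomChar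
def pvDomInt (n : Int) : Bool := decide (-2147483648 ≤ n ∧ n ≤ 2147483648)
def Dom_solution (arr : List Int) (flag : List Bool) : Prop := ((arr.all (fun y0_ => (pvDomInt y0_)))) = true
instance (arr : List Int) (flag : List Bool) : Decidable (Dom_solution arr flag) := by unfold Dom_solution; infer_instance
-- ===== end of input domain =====

-- B keeps x as a run-length list of (value, count) blocks (newest first) with a tracked
-- total length, instead of the literal list A extends and slices; equivalence is about the
-- return value (neither argument is mutated by A).

-- ===== PORT A =====
def solution (arr : List Int) (flag : List Bool) : List Int :=
  (PySem.List.pyRange 0 flag.length 1).foldl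
    (fun x i =>
      if ((PySem.List.pyGet? flag i).getD false) then
        -- x.extend([arr[i]]*arr[i]*2): Python list repetition clamps a non-positive count to []
        x ++ List.replicate (((PySem.List.pyGet? arr i).getD 0) * 2).toNat ((PySem.List.pyGet? arr i).getD 0)
      else
        PySem.List.slice x none (some (-((PySem.List.pyGet? arr i).getD 0))))
    []

-- ===== PORT B =====
-- the while loop of Source B: pop/shrink trailing blocks until `drop` elements are gone;
-- Source B reads blocks[-1], so the recursion runs over the reversed block list
def truncLoop : List (Int × Int) → Int → List (Int × Int)
  | [], _ => []
  | (v, c) :: rest, d =>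
    if d ≤ 0 then (v, c) :: rest
    else if c ≤ d then truncLoop rest (d - c)
    else (v, c - d) :: rest

def altStep (st : List (Int × Int) × Int) (p : Int × Bool) : List (Int × Int) × Int :=
  if p.2 then
    if p.1 * 2 > 0 then (st.1 ++ [(p.1, p.1 * 2)], st.2 + p.1 * 2) else st
  else
    let stop := -p.1
    let target := if stop < 0 then max (st.2 + stop) 0 else min stop st.2
    ((truncLoop st.1.reverse (st.2 - target)).reverse, target)

def solution_alt (arr : List Int) (flag : List Bool) : List Int :=
  let st := (arr.zip flag).foldl altStep ([], 0)
  st.1.flatMap (fun p => List.replicate p.2.toNat p.1)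

-- ===== PRECONDITION & SPEC =====
-- A indexes arr[i] for every i < len(flag): it raises IndexError iff len(arr) < len(flag).
def Pre_solution (arr : List Int) (flag : List Bool) : Prop := flag.length ≤ arr.length
instance (arr : List Int) (flag : List Bool) : Decidable (Pre_solution arr flag) := by unfold Pre_solution; infer_instance
def pvWitness_solution : List Int × List Bool := ([1, 2], [true, false])

def Spec_solution (arr : List Int) (flag : List Bool) (out : List Int) : Prop := out = solution_alt arr flag
instance (arr : List Int) (flag : List Bool) (out : List Int) : Decidable (Spec_solution arr flag out) := by unfold Spec_solution; infer_instance

-- ===== CLAIM (what is proved, stated in full; the proofs are below) =====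
def Claim_equal_solution : Prop := ∀ (arr : List Int) (flag : List Bool), Dom_solution arr flag → Pre_solution arr flag → Spec_solution arr flag (solution arr flag)

-- ===== LEMMAS AND PROOFS =====

-- A's loop body, abstracted over the pair (arr[i], flag[i])
def stepA (x : List Int) (p : Int × Bool) : List Int :=
  if p.2 then x ++ List.replicate (p.1 * 2).toNat p.1
  else PySem.List.slice x none (some (-p.1))

def expandB (rb : List (Int × Int)) : List Int :=
  rb.reverse.flatMap (fun p => List.replicate p.2.toNat p.1)

def invB (x : List Int) (st : List (Int × Int) × Int) : Prop :=
  expandB st.1 = x ∧ st.2 = (x.length : Int) ∧ ∀ p ∈ st.1, 0 < p.2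

-- altStep with the block list reversed (newest block first): the form the invariant proof uses
def stepB (st : List (Int × Int) × Int) (p : Int × Bool) : List (Int × Int) × Int :=
  if p.2 then
    if p.1 * 2 > 0 then ((p.1, p.1 * 2) :: st.1, st.2 + p.1 * 2) else st
  else
    let stop := -p.1
    let target := if stop < 0 then max (st.2 + stop) 0 else min stop st.2
    (truncLoop st.1 (st.2 - target), target)

lemma altStep_rev (st : List (Int × Int) × Int) (p : Int × Bool) :
    ((altStep st p).1.reverse, (altStep st p).2) = stepB (st.1.reverse, st.2) p := by
  obtain ⟨blocks, total⟩ := st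
  obtain ⟨a, f⟩ := p
  cases f <;> simp [altStep, stepB] <;> split_ifs <;> simp

lemma fold_rev : ∀ (l : List (Int × Bool)) (st : List (Int × Int) × Int),
    ((l.foldl altStep st).1.reverse, (l.foldl altStep st).2) = l.foldl stepB (st.1.reverse, st.2) := by
  intro l
  induction l with
  | nil => intro st; rfl
  | cons p t ih =>
    intro st
    simp only [List.foldl_cons]
    rw [ih (altStep st p), altStep_rev]

lemma bridgeA : ∀ (flag : List Bool) (arr : List Int) (x : List Int), flag.length ≤ arr.length →
    (List.range flag.length).foldl
      (fun y k =>
        if ((flag[k]?).getD false) then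
          y ++ List.replicate (((arr[k]?).getD 0) * 2).toNat ((arr[k]?).getD 0)
        else PySem.List.slice y none (some (-((arr[k]?).getD 0)))) x
    = (arr.zip flag).foldl stepA x := by
  intro flag
  induction flag with
  | nil => intro arr x _; simp
  | cons f ft ih =>
    intro arr x hle
    cases arr with
    | nil => simp at hle
    | cons a at_ =>
      rw [List.length_cons, List.range_succ_eq_map]
      simp only [List.foldl_cons, List.foldl_map, List.getElem?_cons_zero, Option.getD_some,
        List.getElem?_cons_succ, List.zip_cons_cons]
      exact ih at_ _ (by simpa using hle)

lemma truncLoop_pos : ∀ (rb : List (Int × Int)), (∀ p ∈ rb, 0 < p.2) → ∀ (d : Int),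
    ∀ p ∈ truncLoop rb d, 0 < p.2 := by
  intro rb
  induction rb with
  | nil => intro _ d p hp; simp [truncLoop] at hp
  | cons b rest ih =>
    intro h d p hp
    obtain ⟨v, c⟩ := b
    simp only [truncLoop] at hp
    split_ifs at hp with h1 h2
    · exact h p hp
    · exact ih (fun q hq => h q (List.mem_cons_of_mem _ hq)) _ p hp
    · rcases List.mem_cons.mp hp with rfl | hm
      · have := h (v, c) (List.mem_cons_self) ; simp_all
      · exact h p (List.mem_cons_of_mem _ hm)

lemma truncLoop_flat : ∀ (rb : List (Int × Int)), (∀ p ∈ rb, 0 < p.2) → ∀ d : Int, 0 ≤ d →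
    expandB (truncLoop rb d) = (expandB rb).take ((expandB rb).length - d.toNat) := by
  intro rb
  induction rb with
  | nil => intro _ d _; simp [truncLoop, expandB]
  | cons b rest ih =>
    intro h d hd
    obtain ⟨v, c⟩ := b
    have hc : 0 < c := h (v, c) List.mem_cons_self
    have hrest : ∀ p ∈ rest, 0 < p.2 := fun q hq => h q (List.mem_cons_of_mem _ hq)
    have hexp : expandB ((v, c) :: rest) = expandB rest ++ List.replicate c.toNat v := by
      simp [expandB]
    simp only [truncLoop]
    split_ifs with h1 h2
    · have : d = 0 := le_antisymm h1 hd
      subst this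
      simp
    · rw [ih hrest (d - c) (by omega), hexp]
      have hlen : (expandB rest ++ List.replicate c.toNat v).length
          = (expandB rest).length + c.toNat := by simp
      rw [hlen]
      have h3 : (expandB rest).length + c.toNat - d.toNat
          = (expandB rest).length - (d - c).toNat := by omega
      rw [h3]
      rw [List.take_append_of_le_length (by omega)]
    · rw [hexp]
      have hexp2 : expandB ((v, c - d) :: rest) = expandB rest ++ List.replicate (c - d).toNat v := by
        simp [expandB]
      rw [hexp2]
      have hlen : (expandB rest ++ List.replicate c.toNat v).length
          = (expandB rest).length + c.toNat := by simp
      rw [hlen]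
      have h3 : (expandB rest).length + c.toNat - d.toNat
          = (expandB rest).length + (c.toNat - d.toNat) := by omega
      rw [h3, List.take_append,
        List.take_of_length_le (by omega : (expandB rest).length ≤ (expandB rest).length + (c.toNat - d.toNat)),
        List.take_replicate]
      have h5 : min ((expandB rest).length + (c.toNat - d.toNat) - (expandB rest).length) c.toNat
          = (c - d).toNat := by omega
      rw [h5]


lemma step_inv {x : List Int} {st : List (Int × Int) × Int} (h : invB x st) (p : Int × Bool) :
    invB (stepA x p) (stepB st p) := by
  obtain ⟨rb, total⟩ := st
  obtain ⟨a, f⟩ := p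
  obtain ⟨hflat, hlen, hpos⟩ := h
  simp only at hflat hlen hpos
  cases f with
  | true =>
    simp only [stepA, stepB, if_true]
    by_cases h2 : a * 2 > 0
    · rw [if_pos h2]
      refine ⟨?_, ?_, ?_⟩
      · have he : expandB ((a, a * 2) :: rb) = expandB rb ++ List.replicate (a * 2).toNat a := by
          simp [expandB]
        show expandB ((a, a * 2) :: rb) = x ++ List.replicate (a * 2).toNat a
        rw [he, hflat]
      · show total + a * 2 = ((x ++ List.replicate (a * 2).toNat a).length : Int)
        simp only [List.length_append, List.length_replicate]
        omega
      · intro q hq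
        rcases List.mem_cons.mp hq with rfl | hm
        · simpa using h2
        · exact hpos q hm
    · rw [if_neg h2]
      have hz : (a * 2).toNat = 0 := by omega
      rw [hz]
      simpa using ⟨hflat, hlen, hpos⟩
  | false =>
    simp only [stepA, stepB, Bool.false_eq_true, if_false]
    by_cases ha : -a < 0
    · rw [if_pos ha]
      have hsl : PySem.List.slice x none (some (-a)) = x.take (x.length - a.toNat) := by
        have h1 : -a = -((a.toNat : Nat) : Int) := by omega
        rw [h1, PySem.List.slice_to_neg_natCast x a.toNat (by omega)]
      refine ⟨?_, ?_, ?_⟩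
      · rw [truncLoop_flat rb hpos _ (by omega), hflat, hsl]
        congr 1
        omega
      · rw [hsl]
        simp only [List.length_take]
        omega
      · exact truncLoop_pos rb hpos _
    · rw [if_neg ha]
      have hsl : PySem.List.slice x none (some (-a)) = x.take (-a).toNat :=
        PySem.List.slice_to x (by omega)
      refine ⟨?_, ?_, ?_⟩
      · rw [truncLoop_flat rb hpos _ (by omega), hflat, hsl]
        by_cases hle : (-a).toNat ≤ x.length
        · congr 1
          omega
        · rw [List.take_of_length_le (by omega), List.take_of_length_le (by omega)]
      · rw [hsl]
        simp only [List.length_take]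
        omega
      · exact truncLoop_pos rb hpos _

lemma fold_inv : ∀ (l : List (Int × Bool)) (x : List Int) (st : List (Int × Int) × Int),
    invB x st → invB (l.foldl stepA x) (l.foldl stepB st) := by
  intro l
  induction l with
  | nil => intro x st h; exact h
  | cons p t ih => intro x st h; exact ih _ _ (step_inv h p)

-- ===== VERDICT (by name: the statement is the Claim_ definition above) =====
theorem solution_spec : Claim_equal_solution := by
  unfold Claim_equal_solution
  intro arr flag _ hpre
  unfold Spec_solution
  unfold solution
  rw [PySem.List.pyRange_one]
  simp only [Int.sub_zero, Int.toNat_natCast, zero_add, List.foldl_map, PySem.List.pyGet?_natCast]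
  rw [bridgeA flag arr [] hpre]
  obtain ⟨hflat, -, -⟩ :=
    fold_inv (arr.zip flag) [] ([], 0) ⟨by simp [expandB], by simp, by simp⟩
  unfold solution_alt
  have hr := congrArg Prod.fst (fold_rev (arr.zip flag) ([], 0))
  simp only [List.reverse_nil] at hr
  show (arr.zip flag).foldl stepA []
      = ((arr.zip flag).foldl altStep ([], 0)).1.flatMap (fun p => List.replicate p.2.toNat p.1)
  rw [← hflat]
  unfold expandB
  rw [← hr, List.reverse_reverse]
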